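-- pv_equiv track=rewrite | github.com/anandology/pyjamas | examples/simplewiki/markdown.py | urlmap
-- ===== SOURCE A (Python) =====
-- def esc(txt):
--     return txt
--
-- def urlmap(txt):
--     idx = txt.find("http://")
--     if idx == -1:
--         return esc(txt)
--     for i in range(idx, len(txt)):
--         c = txt[i]
--         if c == ' ' or c == '\n' or c == '\t':
--             i -= 1
--             break
--
--     i += 1
--
--     beg = txt[:idx]
--     if i == len(txt):
--         url = txt[idx:]
--         end = ''
--     else:
--         url = txt[idx:i]
--         end = txt[i:]
--     txt = esc(beg) + "<a href='%s'>" % url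
--     txt += "%s</a>" % esc(url) + urlmap(end)
--     return txt
-- ===== SOURCE B (Python) =====
-- def esc(txt):
--     return txt
--
-- def urlmap(txt):
--     parts = []
--     while True:
--         idx = txt.find("http://")
--         if idx == -1:
--             parts.append(esc(txt))
--             break
--         ws = idx
--         while ws < len(txt) and txt[ws] != ' ' and txt[ws] != '\n' and txt[ws] != '\t':
--             ws += 1
--         url = txt[idx:ws]
--         parts.append(esc(txt[:idx]) + "<a href='%s'>%s</a>" % (url, esc(url)))
--         txt = txt[ws:]
--     return ''.join(parts)
-- ===== Notes on version B (the rewrite author's own statement) =====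
-- stated objective: alternative
-- what changed: A's tail recursion (rebuild the string by recursing on the remainder, with a for/break loop that backtracks i by one) is replaced by an explicit while-loop with a parts accumulator joined at the end and a direct forward scan to the first whitespace.
import Mathlib
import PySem

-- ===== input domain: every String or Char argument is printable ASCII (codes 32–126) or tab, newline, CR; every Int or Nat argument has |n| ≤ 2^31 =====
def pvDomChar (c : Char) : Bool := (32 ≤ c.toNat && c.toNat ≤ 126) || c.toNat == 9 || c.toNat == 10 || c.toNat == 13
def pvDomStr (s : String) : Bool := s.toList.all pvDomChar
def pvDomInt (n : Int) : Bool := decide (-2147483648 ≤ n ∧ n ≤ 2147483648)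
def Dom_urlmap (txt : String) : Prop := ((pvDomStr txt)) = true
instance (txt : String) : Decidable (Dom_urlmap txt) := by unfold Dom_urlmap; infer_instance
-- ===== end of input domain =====

-- B replaces A's tail recursion by an explicit accumulator loop (parts list joined at the
-- end) with a direct whitespace scan; objective: alternative decomposition, same cost.

-- ===== PORT A =====
-- esc is the identity in the source module.
def pvEscA (cs : List Char) : List Char := cs

-- the 'for i in range(idx, len(txt))' loop with its 'i -= 1; break' and the 'i += 1' after it:
-- returns the final value of i (after the += 1).  Reached only with i ≤ stop in A.
def urlmapALoop (cs : List Char) (i stop : Nat) : Int :=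
  if i < stop then
    (if (cs.getD i ' ') == ' ' || (cs.getD i ' ') == '\n' || (cs.getD i ' ') == '\t' then
      ((i : Int) - 1) + 1
    else urlmapALoop cs (i + 1) stop)
  else ((stop : Int) - 1) + 1
termination_by stop - i

-- fuel makes the recursion total; one unit is consumed per recursive call of the Python.
def urlmapA : Nat → List Char → List Char
  | 0, cs => cs
  | fuel + 1, cs =>
    let idx := PySem.Chars.find cs "http://".toList
    if idx == -1 then pvEscA cs
    else
      let i := urlmapALoop cs idx.toNat cs.length
      let beg := PySem.Chars.slice cs none (some idx)
      let p :=
        if i == (cs.length : Int) then (PySem.Chars.slice cs (some idx) none, ([] : List Char))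
        else (PySem.Chars.slice cs (some idx) (some i), PySem.Chars.slice cs (some i) none)
      (pvEscA beg ++ "<a href='".toList ++ p.1 ++ "'>".toList)
        ++ ("".toList ++ pvEscA p.1 ++ "</a>".toList ++ urlmapA fuel p.2)

def urlmap (txt : String) : String :=
  String.ofList (urlmapA (txt.toList.length + 1) txt.toList)

-- ===== PORT B =====
def pvEscB (cs : List Char) : List Char := cs

-- 'while ws < len(txt) and txt[ws] not whitespace: ws += 1'
def pvScanB (cs : List Char) (ws : Nat) : Nat :=
  if ws < cs.length then
    (if !((cs.getD ws ' ') == ' ') && !((cs.getD ws ' ') == '\n') && !((cs.getD ws ' ') == '\t') then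
      pvScanB cs (ws + 1)
    else ws)
  else ws
termination_by cs.length - ws

-- the 'while True' loop with its parts accumulator; fuel makes it total.
def urlmapBLoop : Nat → List Char → List (List Char) → List (List Char)
  | 0, cs, parts => parts ++ [cs]
  | fuel + 1, cs, parts =>
    let idx := PySem.Chars.find cs "http://".toList
    if idx == -1 then parts ++ [pvEscB cs]
    else
      let ws := pvScanB cs idx.toNat
      let url := PySem.Chars.slice cs (some idx) (some (ws : Int))
      urlmapBLoop fuel (PySem.Chars.slice cs (some (ws : Int)) none)
        (parts ++ [pvEscB (PySem.Chars.slice cs none (some idx))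
                    ++ "<a href='".toList ++ url ++ "'>".toList ++ pvEscB url ++ "</a>".toList])

def urlmap_alt (txt : String) : String :=
  String.ofList (PySem.Chars.join [] (urlmapBLoop (txt.toList.length + 1) txt.toList []))

-- ===== PRECONDITION & SPEC =====
def Spec_urlmap (txt : String) (out : String) : Prop := out = urlmap_alt txt
instance (txt : String) (out : String) : Decidable (Spec_urlmap txt out) := by unfold Spec_urlmap; infer_instance

-- ===== CLAIM (what is proved, stated in full; the proofs are below) =====
def Claim_equal_urlmap : Prop := ∀ (txt : String), Dom_urlmap txt → Spec_urlmap txt (urlmap txt)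

-- ===== LEMMAS AND PROOFS =====

theorem pv_join_nil_eq_flatten (ps : List (List Char)) :
    PySem.Chars.join [] ps = ps.flatten := by
  induction ps with
  | nil => simp [PySem.Chars.join_nil]
  | cons p ps ih =>
    cases ps with
    | nil => simp [PySem.Chars.join_singleton]
    | cons q qs => simp [PySem.Chars.join_cons_cons, ih]

theorem pv_scan_eq_loop (cs : List Char) (i : Nat) (hi : i ≤ cs.length) :
    (pvScanB cs i : Int) = urlmapALoop cs i cs.length := by
  unfold pvScanB urlmapALoop
  by_cases h : i < cs.length
  · have ih := pv_scan_eq_loop cs (i + 1) h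
    simp only [h, if_true, List.getD]
    split_ifs with h1 h2 h2
    · simp at h1 h2; tauto
    · simpa using ih
    · omega
    · simp at h1 h2; tauto
  · have : i = cs.length := le_antisymm hi (not_lt.mp h)
    simp [this]
termination_by cs.length - i

theorem pv_scan_le (cs : List Char) (i : Nat) (hi : i ≤ cs.length) :
    pvScanB cs i ≤ cs.length := by
  unfold pvScanB
  by_cases h : i < cs.length
  · simp only [h, if_true]
    split
    · exact pv_scan_le cs (i + 1) h
    · exact hi
  · simp [h, hi]
termination_by cs.length - i

theorem pv_flatten_invariant (fuel : Nat) :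
    ∀ (cs : List Char) (parts : List (List Char)),
      (urlmapBLoop fuel cs parts).flatten = parts.flatten ++ urlmapA fuel cs := by
  induction fuel with
  | zero => intro cs parts; simp [urlmapBLoop, urlmapA]
  | succ fuel ih =>
    intro cs parts
    simp only [urlmapBLoop, urlmapA]
    simp only [show ("http://".toList) = ['h','t','t','p',':','/','/'] from rfl]
    by_cases hidx : PySem.Chars.find cs ['h','t','t','p',':','/','/'] = -1
    · simp [hidx, pvEscA, pvEscB]
    · have hb : (PySem.Chars.find cs ['h','t','t','p',':','/','/'] == -1) = false := by
        simpa using hidx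
      simp only [hb, Bool.false_eq_true, if_false]
      set idx := PySem.Chars.find cs ['h','t','t','p',':','/','/'] with hidxdef
      have hnn : 0 ≤ idx := by
        have := PySem.Chars.neg_one_le_find (s := cs) (sub := ['h','t','t','p',':','/','/'])
        omega
      have hle : idx ≤ (cs.length : Int) := PySem.Chars.find_le_length cs ['h','t','t','p',':','/','/']
      have hidxle : idx.toNat ≤ cs.length := by omega
      have hws_le : pvScanB cs idx.toNat ≤ cs.length := pv_scan_le cs idx.toNat hidxle
      have hloop : (pvScanB cs idx.toNat : Int) = urlmapALoop cs idx.toNat cs.length :=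
        pv_scan_eq_loop cs idx.toNat hidxle
      set ws := pvScanB cs idx.toNat with hwsdef
      -- A's two branches both give url = cs[idx:ws], end = cs[ws:]
      have hsliceA :
          (if urlmapALoop cs idx.toNat cs.length == (cs.length : Int) then
              (PySem.Chars.slice cs (some idx) none, ([] : List Char))
            else (PySem.Chars.slice cs (some idx) (some (urlmapALoop cs idx.toNat cs.length)),
                  PySem.Chars.slice cs (some (urlmapALoop cs idx.toNat cs.length)) none))
          = (PySem.Chars.slice cs (some idx) (some (ws : Int)),
             PySem.Chars.slice cs (some (ws : Int)) none) := by
        rw [← hloop]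
        by_cases hend : (ws : Int) = (cs.length : Int)
        · have hwn : ws = cs.length := by exact_mod_cast hend
          simp only [hend, beq_self_eq_true, if_true, Prod.mk.injEq]
          have hcast : idx = ((idx.toNat : Nat) : Int) := (Int.toNat_of_nonneg hnn).symm
          refine ⟨?_, ?_⟩
          · -- cs[idx:] = cs[idx:len]
            rw [PySem.Chars.slice_eq_listSlice, PySem.Chars.slice_eq_listSlice, hcast,
                PySem.List.slice_some_none, PySem.List.slice_natCast,
                PySem.List.clampIdx_natCast, Nat.min_eq_left hidxle]
            exact (List.take_of_length_le (by simp)).symm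
          · -- [] = cs[len:]
            rw [PySem.Chars.slice_eq_listSlice, PySem.List.slice_from_natCast]
            simp
        · have : ¬ ((ws : Int) == (cs.length : Int)) := by simpa using hend
          simp [this]
      rw [hsliceA]
      rw [ih (PySem.Chars.slice cs (some (ws : Int)) none)]
      simp [pvEscA, pvEscB]

-- ===== VERDICT (by name: the statement is the Claim_ definition above) =====
theorem urlmap_spec : Claim_equal_urlmap := by
  intro txt _
  unfold Spec_urlmap urlmap urlmap_alt
  rw [pv_join_nil_eq_flatten, pv_flatten_invariant]
  simp
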